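-- pv_equiv track=rewrite | github.com/dickbob14/finwave | backend/insights/llm_commentary.py | _parse_bulleted_response
-- ===== SOURCE A (Python) =====
-- from typing import Dict, List, Optional, Any
--
-- def _parse_bulleted_response(response: str) -> List[str]:
--     """Parse bulleted response into list"""
--     lines = response.strip().split('\n')
--     bullets = []
--
--     for line in lines:
--         line = line.strip()
--         if line and (line.startswith('•') or line.startswith('-') or line.startswith('*')):
--             bullets.append(line[1:].strip())
--         elif line and bullets:  # Continuation of previous bullet
--             bullets[-1] += " " + line
--
--     return bullets if bullets else [response]
-- ===== SOURCE B (Python) =====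
-- from typing import List
--
-- def _take_continuation(lines):
--     """Return (continuation lines of the current bullet, remaining lines)."""
--     if not lines:
--         return [], []
--     head = lines[0]
--     if not head:
--         return _take_continuation(lines[1:])
--     if head[0] in '•-*':
--         return [], lines
--     cont, rest = _take_continuation(lines[1:])
--     return [head] + cont, rest
--
-- def _collect(lines):
--     """Recursively build each bullet forward: bullet head + its continuations."""
--     if not lines:
--         return []
--     head = lines[0]
--     if head and head[0] in '•-*':
--         cont, rest = _take_continuation(lines[1:])
--         return [' '.join([head[1:].strip()] + cont)] + _collect(rest)
--     return _collect(lines[1:])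
--
-- def _parse_bulleted_response(response: str) -> List[str]:
--     """Parse bulleted response into list (recursive descent over stripped lines)."""
--     lines = [l.strip() for l in response.strip().split('\n')]
--     bullets = _collect(lines)
--     return bullets if bullets else [response]
-- ===== Notes on version B (the rewrite author's own statement) =====
-- stated objective: alternative
-- what changed: B replaces A's single accumulator loop that mutates bullets[-1] by a recursive descent: a helper takes each bullet's continuation block forward (_take_continuation) and _collect builds every bullet as one join of head+block, recursing on the remaining suffix; the empty->[response] fallback is kept.
import Mathlib
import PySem

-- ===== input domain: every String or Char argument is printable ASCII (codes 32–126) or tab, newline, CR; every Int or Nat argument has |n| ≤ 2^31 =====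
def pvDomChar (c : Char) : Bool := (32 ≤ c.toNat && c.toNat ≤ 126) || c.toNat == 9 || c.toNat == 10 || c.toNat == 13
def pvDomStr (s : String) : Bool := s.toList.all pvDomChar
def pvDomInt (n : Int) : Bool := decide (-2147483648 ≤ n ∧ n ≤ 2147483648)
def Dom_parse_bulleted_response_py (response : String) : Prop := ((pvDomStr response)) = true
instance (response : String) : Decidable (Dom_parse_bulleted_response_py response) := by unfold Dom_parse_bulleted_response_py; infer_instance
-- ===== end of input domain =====

-- B parses by recursive descent (each bullet built forward with its continuation block)
-- instead of A's accumulator loop that concatenates onto bullets[-1]; same return value.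

-- ===== PORT A =====
-- one loop step of A: strip the line, append a new bullet, or concatenate onto bullets[-1]
def pvAStep (bullets : List (List Char)) (l : List Char) : List (List Char) :=
  if PySem.Chars.strip l ≠ [] ∧ (PySem.Chars.startswith (PySem.Chars.strip l) ['•'] ∨
      PySem.Chars.startswith (PySem.Chars.strip l) ['-'] ∨
      PySem.Chars.startswith (PySem.Chars.strip l) ['*']) then
    bullets ++ [PySem.Chars.strip (PySem.Chars.slice (PySem.Chars.strip l) (some 1) none)]
  else if PySem.Chars.strip l ≠ [] ∧ bullets ≠ [] then
    bullets.dropLast ++ [bullets.getLastD [] ++ ' ' :: PySem.Chars.strip l]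
  else
    bullets

def parse_bulleted_response_py (response : String) : List String :=
  let lines := PySem.Chars.splitOn (PySem.Chars.strip response.toList) ['\n']
  let bullets := lines.foldl pvAStep []
  if bullets = [] then [response] else bullets.map String.ofList

-- ===== PORT B =====
def pvBulletChars : List Char := ['•', '-', '*']

-- _take_continuation: (this bullet's continuation lines, remaining lines)
def pvTakeCont : List (List Char) → List (List Char) × List (List Char)
  | [] => ([], [])
  | h :: t =>
    if h = [] then pvTakeCont t
    else if h.headD ' ' ∈ pvBulletChars then ([], h :: t)
    else
      ((h :: (pvTakeCont t).1), (pvTakeCont t).2)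

theorem pvTakeCont_rest_len : ∀ ss : List (List Char), (pvTakeCont ss).2.length ≤ ss.length := by
  intro ss
  induction ss with
  | nil => simp [pvTakeCont]
  | cons h t ih =>
    simp only [pvTakeCont]
    split_ifs with h1 h2 <;> simp <;> omega

-- _collect: build each bullet as ' '.join(head[1:].strip() :: continuation), recurse on the rest
def pvCollect (ss : List (List Char)) : List (List Char) :=
  match ss with
  | [] => []
  | h :: t =>
    if h ≠ [] ∧ h.headD ' ' ∈ pvBulletChars then
      PySem.Chars.join [' ']
        (PySem.Chars.strip (PySem.Chars.slice h (some 1) none) :: (pvTakeCont t).1)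
        :: pvCollect (pvTakeCont t).2
    else pvCollect t
termination_by ss.length
decreasing_by
  · have := pvTakeCont_rest_len t; simp; omega
  · simp

def parse_bulleted_response_py_alt (response : String) : List String :=
  let lines := (PySem.Chars.splitOn (PySem.Chars.strip response.toList) ['\n']).map PySem.Chars.strip
  let bullets := pvCollect lines
  if bullets = [] then [response] else bullets.map String.ofList

-- ===== PRECONDITION & SPEC =====
def Spec_parse_bulleted_response_py (response : String) (out : List String) : Prop := out = parse_bulleted_response_py_alt response
instance (response : String) (out : List String) : Decidable (Spec_parse_bulleted_response_py response out) := by unfold Spec_parse_bulleted_response_py; infer_instance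

-- ===== CLAIM (what is proved, stated in full; the proofs are below) =====
def Claim_equal_parse_bulleted_response_py : Prop := ∀ (response : String), Dom_parse_bulleted_response_py response → Spec_parse_bulleted_response_py response (parse_bulleted_response_py response)

-- ===== LEMMAS AND PROOFS =====

-- A's step applied to a raw line only looks at the stripped line
def pvAStep' (bullets : List (List Char)) (s : List Char) : List (List Char) :=
  if s ≠ [] ∧ (PySem.Chars.startswith s ['•'] ∨ PySem.Chars.startswith s ['-'] ∨
      PySem.Chars.startswith s ['*']) then
    bullets ++ [PySem.Chars.strip (PySem.Chars.slice s (some 1) none)]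
  else if s ≠ [] ∧ bullets ≠ [] then
    bullets.dropLast ++ [bullets.getLastD [] ++ ' ' :: s]
  else
    bullets

-- the two ports' bullet tests agree: a single-char-prefix test is a head test
theorem pvTest_eq (line : List Char) :
    (line ≠ [] ∧ (PySem.Chars.startswith line ['•'] ∨ PySem.Chars.startswith line ['-'] ∨
      PySem.Chars.startswith line ['*'])) ↔
    (line ≠ [] ∧ line.headD ' ' ∈ pvBulletChars) := by
  cases line with
  | nil => simp
  | cons a as =>
    simp only [PySem.Chars.startswith_iff, List.cons_prefix_cons, List.nil_prefix, and_true,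
      List.headD_cons, pvBulletChars, List.mem_cons, List.not_mem_nil, or_false, ne_eq,
      reduceCtorEq, not_false_eq_true, true_and]
    tauto

-- the suffix a continuation block adds to the current bullet string
def pvGlue (c : List (List Char)) : List Char := (c.map (fun p => ' ' :: p)).flatten

theorem pvJoin_eq_glue (b : List Char) (c : List (List Char)) :
    PySem.Chars.join [' '] (b :: c) = b ++ pvGlue c := by
  induction c generalizing b with
  | nil => simp [PySem.Chars.join_singleton, pvGlue]
  | cons p ps ih =>
    rw [PySem.Chars.join_cons_cons, ih]
    simp [pvGlue]

-- main invariant: from a state ending in bullet x, A's loop first extends x by the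
-- continuation block and then produces exactly pvCollect of the remaining suffix
theorem pvFold_inv (ss : List (List Char)) (acc : List (List Char)) (x : List Char) :
    List.foldl pvAStep' (acc ++ [x]) ss =
      acc ++ (x ++ pvGlue (pvTakeCont ss).1) :: pvCollect (pvTakeCont ss).2 := by
  induction ss generalizing acc x with
  | nil => simp [pvTakeCont, pvGlue, pvCollect]
  | cons h t ih =>
    by_cases hb : h ≠ [] ∧ h.headD ' ' ∈ pvBulletChars
    · -- h opens a new bullet
      have hA := (pvTest_eq h).mpr hb
      have hco : pvCollect (h :: t) =
          PySem.Chars.join [' ']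
            (PySem.Chars.strip (PySem.Chars.slice h (some 1) none) :: (pvTakeCont t).1)
            :: pvCollect (pvTakeCont t).2 := by
        rw [pvCollect, if_pos hb]
      simp only [List.foldl_cons, pvAStep', if_pos hA, pvTakeCont, if_neg hb.1, if_pos hb.2, hco]
      rw [ih (acc ++ [x]), pvJoin_eq_glue]
      simp [pvGlue]
    · by_cases he : h = []
      · -- blank line: skipped by both
        simp only [List.foldl_cons, pvAStep', he]
        rw [if_neg (by simp), if_neg (by simp)]
        simp only [pvTakeCont]
        exact ih acc x
      · -- continuation line: A appends to the last bullet, B's block takes it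
        have hnb : ¬ h.headD ' ' ∈ pvBulletChars := fun hm => hb ⟨he, hm⟩
        have hA : ¬ (h ≠ [] ∧ (PySem.Chars.startswith h ['•'] ∨ PySem.Chars.startswith h ['-'] ∨
            PySem.Chars.startswith h ['*'])) := fun hc => hb ((pvTest_eq h).mp hc)
        simp only [List.foldl_cons, pvAStep', if_neg hA,
          if_pos (⟨he, by simp⟩ : h ≠ [] ∧ acc ++ [x] ≠ [])]
        rw [List.dropLast_concat, List.getLastD_concat]
        rw [ih acc (x ++ ' ' :: h)]
        simp only [pvTakeCont, if_neg he, if_neg hnb]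
        simp [pvGlue]

-- starting from the empty accumulator, A's loop is exactly pvCollect
theorem pvFold_nil (ss : List (List Char)) : List.foldl pvAStep' [] ss = pvCollect ss := by
  induction ss with
  | nil => simp [pvCollect]
  | cons h t ih =>
    by_cases hb : h ≠ [] ∧ h.headD ' ' ∈ pvBulletChars
    · have hA := (pvTest_eq h).mpr hb
      have hco : pvCollect (h :: t) =
          PySem.Chars.join [' ']
            (PySem.Chars.strip (PySem.Chars.slice h (some 1) none) :: (pvTakeCont t).1)
            :: pvCollect (pvTakeCont t).2 := by
        rw [pvCollect, if_pos hb]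
      simp only [List.foldl_cons, pvAStep', if_pos hA, List.nil_append, hco]
      have := pvFold_inv t [] (PySem.Chars.strip (PySem.Chars.slice h (some 1) none))
      simp only [List.nil_append] at this
      rw [this, pvJoin_eq_glue]
    · have hA : ¬ (h ≠ [] ∧ (PySem.Chars.startswith h ['•'] ∨ PySem.Chars.startswith h ['-'] ∨
          PySem.Chars.startswith h ['*'])) := fun hc => hb ((pvTest_eq h).mp hc)
      simp only [List.foldl_cons, pvAStep', if_neg hA]
      rw [if_neg (by simp)]
      have hco : pvCollect (h :: t) = pvCollect t := by
        rw [pvCollect, if_neg hb]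
      rw [hco]
      exact ih

-- ===== VERDICT (by name: the statement is the Claim_ definition above) =====
theorem parse_bulleted_response_py_spec : Claim_equal_parse_bulleted_response_py := by
  intro response _
  unfold Spec_parse_bulleted_response_py parse_bulleted_response_py parse_bulleted_response_py_alt
  have hfold : (PySem.Chars.splitOn (PySem.Chars.strip response.toList) ['\n']).foldl pvAStep []
      = pvCollect ((PySem.Chars.splitOn (PySem.Chars.strip response.toList) ['\n']).map PySem.Chars.strip) := by
    rw [← pvFold_nil, List.foldl_map]
    rfl
  simp only [hfold]
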